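-- pv_equiv track=rewrite | github.com/dan-elliott-appneta/rally-cli | src/rally_tui/cli/commands/comment.py | _is_valid_ticket_id
-- ===== SOURCE A (Python) =====
-- def _is_valid_ticket_id(ticket_id: str) -> bool:
--     """Validate ticket ID format.
--
--     Args:
--         ticket_id: The ticket ID to validate.
--
--     Returns:
--         True if valid, False otherwise.
--     """
--     prefixes = ("US", "DE", "TA", "TC")
--     ticket_upper = ticket_id.upper()
--     for prefix in prefixes:
--         if ticket_upper.startswith(prefix):
--             # Check that remaining characters are digits
--             remaining = ticket_upper[len(prefix) :]
--             return remaining.isdigit() and len(remaining) > 0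
--     return False
-- ===== SOURCE B (Python) =====
-- def _is_valid_ticket_id(ticket_id: str) -> bool:
--     """Validate ticket ID format.
--
--     Single left-to-right pass: a small state machine consumes one character
--     at a time (START -> saw-first-letter -> prefix-complete -> digits),
--     bailing out as soon as a character cannot extend a valid ID.
--     """
--     state = "START"
--     for ch in ticket_id:
--         c = ch.upper()
--         if state == "START":
--             if c in ("U", "D", "T"):
--                 state = c
--             else:
--                 return False
--         elif state in ("U", "D", "T"):
--             if (state == "U" and c == "S") or (state == "D" and c == "E") \
--                     or (state == "T" and c in ("A", "C")):
--                 state = "PFX"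
--             else:
--                 return False
--         else:  # "PFX" (prefix done, no digit yet) or "DIGITS"
--             if c.isdigit():
--                 state = "DIGITS"
--             else:
--                 return False
--     return state == "DIGITS"
-- ===== Notes on version B (the rewrite author's own statement) =====
-- stated objective: alternative
-- what changed: Replaces the loop over candidate prefixes with per-prefix startswith/slice/isdigit passes by a single left-to-right character-at-a-time finite state machine (START -> first letter -> prefix complete -> digits) with early exit on the first invalid character.
import Mathlib
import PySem

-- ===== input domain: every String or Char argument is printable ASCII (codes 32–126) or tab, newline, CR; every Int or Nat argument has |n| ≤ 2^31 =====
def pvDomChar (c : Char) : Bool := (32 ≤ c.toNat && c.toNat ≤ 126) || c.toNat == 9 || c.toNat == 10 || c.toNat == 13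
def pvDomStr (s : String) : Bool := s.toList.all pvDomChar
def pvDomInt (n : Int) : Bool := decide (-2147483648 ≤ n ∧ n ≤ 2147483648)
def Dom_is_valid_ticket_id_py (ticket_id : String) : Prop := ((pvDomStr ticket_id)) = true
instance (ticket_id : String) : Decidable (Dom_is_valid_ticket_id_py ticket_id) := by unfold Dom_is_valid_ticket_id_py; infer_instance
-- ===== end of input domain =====

-- B replaces A's loop over candidate prefixes by a single character-at-a-time state machine; objective: alternative decomposition, same cost.

-- ===== PORT A =====
-- A's loop over the prefix tuple, as structural recursion: first matching prefix decides.
def ivLoopA (ticket_upper : List Char) : List (List Char) → Bool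
  | [] => false
  | p :: ps =>
    if PySem.Chars.startswith ticket_upper p then
      let remaining := PySem.Chars.slice ticket_upper (some (p.length : Int)) none
      PySem.Chars.strIsdigit remaining && decide (remaining.length > 0)
    else ivLoopA ticket_upper ps

def is_valid_ticket_id_py (ticket_id : String) : Bool :=
  ivLoopA (PySem.Chars.upper ticket_id.toList)
    [['U','S'], ['D','E'], ['T','A'], ['T','C']]

-- ===== PORT B =====
-- B: a finite state machine consuming one (uppercased) character at a time,
-- returning false as soon as a character cannot extend a valid ID.
inductive IvState | start | sawU | sawD | sawT | pfx | digits
deriving DecidableEq, Repr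

def ivRunB : IvState → List Char → Bool
  | st, [] => st == IvState.digits
  | st, ch :: rest =>
    let c := PySem.Chars.upperChar ch
    match st with
    | .start =>
      if c = 'U' then ivRunB .sawU rest
      else if c = 'D' then ivRunB .sawD rest
      else if c = 'T' then ivRunB .sawT rest
      else false
    | .sawU => if c = 'S' then ivRunB .pfx rest else false
    | .sawD => if c = 'E' then ivRunB .pfx rest else false
    | .sawT => if c = 'A' ∨ c = 'C' then ivRunB .pfx rest else false
    | _ => if PySem.Chars.isdigit c then ivRunB .digits rest else false

def is_valid_ticket_id_py_alt (ticket_id : String) : Bool :=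
  ivRunB .start ticket_id.toList

-- ===== PRECONDITION & SPEC =====
def Spec_is_valid_ticket_id_py (ticket_id : String) (out : Bool) : Prop := out = is_valid_ticket_id_py_alt ticket_id
instance (ticket_id : String) (out : Bool) : Decidable (Spec_is_valid_ticket_id_py ticket_id out) := by unfold Spec_is_valid_ticket_id_py; infer_instance

-- ===== CLAIM (what is proved, stated in full; the proofs are below) =====
def Claim_equal_is_valid_ticket_id_py : Prop := ∀ (ticket_id : String), Dom_is_valid_ticket_id_py ticket_id → Spec_is_valid_ticket_id_py ticket_id (is_valid_ticket_id_py ticket_id)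

-- ===== LEMMAS AND PROOFS =====

-- Dropping two characters from a two-plus-character list, as Python's [2:] slice.
lemma sliceTwo {α : Type} (x y : α) (l : List α) :
    PySem.List.slice (x :: y :: l) (some (2 : Int)) none = l := by
  simp [PySem.List.slice, PySem.List.clampIdx]

-- The digit phase of the DFA checks "all remaining characters are digits".
lemma runDigits (rest : List Char) :
    ivRunB .digits rest = rest.all (fun ch => PySem.Chars.isdigit (PySem.Chars.upperChar ch)) := by
  induction rest with
  | nil => rfl
  | cons ch t ih =>
    simp only [ivRunB, List.all_cons]
    split_ifs with h <;> simp_all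

-- From the prefix-complete state, the DFA accepts iff the remainder is a nonempty digit string.
lemma runPfx (rest : List Char) :
    ivRunB .pfx rest
      = (PySem.Chars.strIsdigit (List.map PySem.Chars.upperChar rest)
          && decide ((List.map PySem.Chars.upperChar rest).length > 0)) := by
  cases rest with
  | nil => rfl
  | cons ch t =>
    simp only [ivRunB, PySem.Chars.strIsdigit, List.map_cons, List.isEmpty_cons, List.all_cons,
      List.all_map, Bool.not_false, Bool.true_and, List.length_cons]
    split_ifs with h <;> simp_all [runDigits, Function.comp_def]

set_option maxHeartbeats 2000000 in
lemma key (s : List Char) :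
    ivLoopA (PySem.Chars.upper s) [['U','S'], ['D','E'], ['T','A'], ['T','C']]
      = ivRunB .start s := by
  match s with
  | [] => decide
  | [a] =>
    simp only [PySem.Chars.upper, List.map_cons, List.map_nil, ivLoopA, ivRunB,
      PySem.Chars.startswith, List.isPrefixOf]
    split_ifs <;> simp_all
  | a :: b :: rest =>
    simp only [PySem.Chars.upper, List.map_cons, ivLoopA, ivRunB,
      PySem.Chars.startswith, List.isPrefixOf]
    by_cases hU : PySem.Chars.upperChar a = 'U' <;>
    by_cases hD : PySem.Chars.upperChar a = 'D' <;>
    by_cases hT : PySem.Chars.upperChar a = 'T' <;>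
    by_cases hS : PySem.Chars.upperChar b = 'S' <;>
    by_cases hE : PySem.Chars.upperChar b = 'E' <;>
    by_cases hA : PySem.Chars.upperChar b = 'A' <;>
    by_cases hC : PySem.Chars.upperChar b = 'C' <;>
      simp_all [sliceTwo, runPfx,
        @eq_comm Char 'U' (PySem.Chars.upperChar a), @eq_comm Char 'D' (PySem.Chars.upperChar a),
        @eq_comm Char 'T' (PySem.Chars.upperChar a), @eq_comm Char 'S' (PySem.Chars.upperChar b),
        @eq_comm Char 'E' (PySem.Chars.upperChar b), @eq_comm Char 'A' (PySem.Chars.upperChar b),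
        @eq_comm Char 'C' (PySem.Chars.upperChar b)]

-- ===== VERDICT (by name: the statement is the Claim_ definition above) =====
theorem is_valid_ticket_id_py_spec : Claim_equal_is_valid_ticket_id_py := by
  intro s _
  unfold Spec_is_valid_ticket_id_py is_valid_ticket_id_py is_valid_ticket_id_py_alt
  exact key s.toList
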